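-- pv_equiv track=rewrite | github.com/shenceyang/data-structure | array&string/technique/2.Sliding_Windows.py | longest_len_one_after_flip
-- ===== SOURCE A (Python) =====
-- def longest_len_one_after_flip(s):
--     #given s = "1101100111", -> 5
--     left = 0
--     curr = 0
--     res = 0
--     for right in range(len(s)):
--         if s[right] == "0":
--             curr += 1
--         while curr > 1:
--             # if window broke, (kick out the leftmost 0 to refresh and continue) OR (calculate length immediately)
--             if s[left] == "0":
--                 curr -= 1
--             left += 1
--         res = max(res, right - left + 1)
--     return res
-- ===== SOURCE B (Python) =====
-- def longest_len_one_after_flip(s):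
--     # Track only the positions of the two most recent zeros; the valid
--     # window ending at `right` is (prevPrev, right], of length right - prevPrev.
--     prev = -1
--     prevPrev = -1
--     res = 0
--     for right, ch in enumerate(s):
--         if ch == "0":
--             prevPrev = prev
--             prev = right
--         res = max(res, right - prevPrev)
--     return res
-- ===== Notes on version B (the rewrite author's own statement) =====
-- stated objective: simpler
-- what changed: Replaced the shrinking sliding window (left pointer + zero count + inner while loop) by tracking only the positions of the two most recent zeros; window length is right - prevPrev, no inner loop.
import Mathlib
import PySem

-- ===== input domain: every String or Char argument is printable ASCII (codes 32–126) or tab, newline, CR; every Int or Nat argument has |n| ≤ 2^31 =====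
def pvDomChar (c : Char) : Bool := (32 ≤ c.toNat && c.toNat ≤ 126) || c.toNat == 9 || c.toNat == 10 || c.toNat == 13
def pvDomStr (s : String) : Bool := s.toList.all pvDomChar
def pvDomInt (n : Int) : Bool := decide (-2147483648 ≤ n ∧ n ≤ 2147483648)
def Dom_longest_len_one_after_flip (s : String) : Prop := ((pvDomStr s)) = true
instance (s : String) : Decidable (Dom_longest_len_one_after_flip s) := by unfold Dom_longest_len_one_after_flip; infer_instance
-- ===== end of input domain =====

-- B replaces A's left-pointer-plus-zero-count shrinking window by tracking only the
-- positions of the two most recent zeros (simpler: no inner while loop).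

-- ===== PORT A =====
-- the inner `while curr > 1` loop; fuel = len(s) always suffices (proved below)
def pvWhileA (cs : List Char) : Nat → Int → Int → Int × Int
  | 0, left, curr => (left, curr)
  | fuel+1, left, curr =>
    if curr > 1 then
      let curr' := if PySem.List.pyGetD cs left ' ' == '0' then curr - 1 else curr
      pvWhileA cs fuel (left + 1) curr'
    else (left, curr)

def pvStepA (cs : List Char) (st : Int × Int × Int) (p : Int × Char) : Int × Int × Int :=
  let curr := if p.2 == '0' then st.2.1 + 1 else st.2.1
  let lc := pvWhileA cs cs.length st.1 curr
  (lc.1, lc.2, max st.2.2 (p.1 - lc.1 + 1))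

def longest_len_one_after_flip (s : String) : Int :=
  let cs := s.toList
  ((PySem.List.enumerate cs 0).foldl (pvStepA cs) (0, 0, 0)).2.2

-- ===== PORT B =====
def pvStepB (st : Int × Int × Int) (p : Int × Char) : Int × Int × Int :=
  let pp := if p.2 == '0' then (p.1, st.1) else (st.1, st.2.1)
  (pp.1, pp.2, max st.2.2 (p.1 - pp.2))

def longest_len_one_after_flip_alt (s : String) : Int :=
  ((PySem.List.enumerate s.toList 0).foldl pvStepB (-1, -1, 0)).2.2

-- ===== PRECONDITION & SPEC =====
def Spec_longest_len_one_after_flip (s : String) (out : Int) : Prop := out = longest_len_one_after_flip_alt s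
instance (s : String) (out : Int) : Decidable (Spec_longest_len_one_after_flip s out) := by unfold Spec_longest_len_one_after_flip; infer_instance

-- ===== CLAIM (what is proved, stated in full; the proofs are below) =====
def Claim_equal_longest_len_one_after_flip : Prop := ∀ (s : String), Dom_longest_len_one_after_flip s → Spec_longest_len_one_after_flip s (longest_len_one_after_flip s)

-- ===== LEMMAS AND PROOFS =====

-- invariant relating B's state (prev = p, prevPrev = P) to the prefix cs[0:right]
def pvInv (cs : List Char) (right : Nat) (p P : Int) : Prop :=
  -1 ≤ P ∧ P ≤ p ∧ p < (right : Int) ∧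
  (p = -1 → P = -1) ∧
  (0 ≤ p → P < p ∧ PySem.List.pyGetD cs p ' ' = '0') ∧
  (∀ j : Nat, P < (j : Int) → j < right → (j : Int) ≠ p → PySem.List.pyGetD cs (j : Int) ' ' ≠ '0')

lemma pvWhileA_stop (cs : List Char) (fuel : Nat) (left curr : Int) (h : curr ≤ 1) :
    pvWhileA cs fuel left curr = (left, curr) := by
  cases fuel with
  | zero => rfl
  | succ n => simp [pvWhileA]; omega

lemma pvWhileA_reach (cs : List Char) (p : Int)
    (hp : PySem.List.pyGetD cs p ' ' = '0')
    (fuel : Nat) : ∀ (left : Int), 0 ≤ left → left ≤ p →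
    (∀ j : Int, left ≤ j → j < p → PySem.List.pyGetD cs j ' ' ≠ '0') →
    (p + 1 - left).toNat ≤ fuel →
    pvWhileA cs fuel left 2 = (p + 1, 1) := by
  induction fuel with
  | zero => intro left h0 hl _ hf; omega
  | succ n ih =>
    intro left h0 hl hnz hf
    rcases eq_or_lt_of_le hl with heq | hlt
    · subst heq
      simp [pvWhileA, hp]
      exact pvWhileA_stop cs n (left + 1) 1 (by omega)
    · have hne : PySem.List.pyGetD cs left ' ' ≠ '0' := hnz left le_rfl hlt
      simp [pvWhileA, hne]
      exact ih (left + 1) (by omega) (by omega)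
        (fun j hj hj' => hnz j (by omega) hj') (by omega)

lemma pvDrop_getD (cs : List Char) (right : Nat) (c : Char) (rest : List Char)
    (h : cs.drop right = c :: rest) : PySem.List.pyGetD cs (right : Int) ' ' = c := by
  have hlt : right < cs.length := by
    by_contra hn
    rw [List.drop_eq_nil_of_le (by omega)] at h
    simp at h
  have : cs[right] = c := by
    have h0 : (cs.drop right)[0]'(by simp [h]) = c := by simp [h]
    rw [List.getElem_drop] at h0
    simpa using h0
  simp [PySem.List.pyGetD_natCast, List.getD_eq_getElem?_getD, List.getElem?_eq_getElem hlt, this]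

lemma pvMain (cs : List Char) : ∀ (suffix : List Char) (right : Nat) (p P res : Int),
    cs.drop right = suffix →
    pvInv cs right p P →
    ((PySem.List.enumerate suffix (right : Int)).foldl (pvStepA cs)
        (P + 1, (if P < p then (1:Int) else 0), res)).2.2
      = ((PySem.List.enumerate suffix (right : Int)).foldl pvStepB (p, P, res)).2.2 := by
  intro suffix
  induction suffix with
  | nil => intro right p P res _ _; simp [PySem.List.enumerate_nil]
  | cons c rest ih =>
    intro right p P res hdrop hinv
    obtain ⟨h1, h2, h3, h4, h5, h6⟩ := hinv
    have hc : PySem.List.pyGetD cs (right : Int) ' ' = c := pvDrop_getD cs right c rest hdrop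
    have hdrop' : cs.drop (right + 1) = rest := by
      have := congrArg (List.drop 1) hdrop
      simpa [List.drop_drop, Nat.add_comm] using this
    rw [PySem.List.enumerate_cons]
    simp only [List.foldl_cons]
    by_cases hc0 : c = '0'
    · subst hc0
      by_cases hp : p = -1
      · -- first zero ever: curr becomes 1, while loop is a no-op
        have hP : P = -1 := h4 hp
        subst hp; subst hP
        have hA : pvStepA cs ((-1:Int) + 1, (if (-1:Int) < -1 then (1:Int) else 0), res) ((right : Int), '0')
            = ((-1:Int) + 1, 1, max res ((right : Int) + 1)) := by
          simp [pvStepA, pvWhileA_stop cs cs.length 0 1 (by omega)]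
        have hB : pvStepB ((-1 : Int), -1, res) ((right : Int), '0')
            = ((right : Int), -1, max res ((right : Int) + 1)) := by
          simp [pvStepB]
        rw [hA, hB]
        have := ih (right + 1) (right : Int) (-1) (max res ((right : Int) + 1)) hdrop'
          ⟨by omega, by omega, by push_cast; omega, by omega,
           fun _ => ⟨by omega, hc⟩,
           fun j hj hj' hj'' => h6 j hj (by omega) (by omega)⟩
        simpa [show ((-1:Int) < (right:Int)) = True by simp; omega] using this
      · -- second zero in window: while loop advances left past p
        have hp0 : 0 ≤ p := by omega
        obtain ⟨hPp, hpz⟩ := h5 hp0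
        have hA : pvStepA cs (P + 1, (if P < p then (1:Int) else 0), res) ((right : Int), '0')
            = (p + 1, 1, max res ((right : Int) - p)) := by
          have hw : pvWhileA cs cs.length (P + 1) 2 = (p + 1, 1) := by
            have hlen : p < (cs.length : Int) := by
              by_contra hn
              have : PySem.List.pyGetD cs p ' ' = ' ' := by
                apply PySem.List.pyGetD_of_none
                rw [PySem.List.pyGet?_eq_none_iff]
                intro ⟨_, h⟩; omega
              simp [this] at hpz
            exact pvWhileA_reach cs p hpz cs.length (P + 1) (by omega) (by omega)
              (fun j hj hj' => by
                have hj0 : 0 ≤ j := by omega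
                have := h6 j.toNat (by omega) (by omega) (by omega)
                simpa [Int.toNat_of_nonneg hj0] using this)
              (by omega)
          simp [pvStepA, hPp, hw]; ring_nf
        have hB : pvStepB (p, P, res) ((right : Int), '0')
            = ((right : Int), p, max res ((right : Int) - p)) := by
          simp [pvStepB]
        rw [hA, hB]
        have := ih (right + 1) (right : Int) p (max res ((right : Int) - p)) hdrop'
          ⟨by omega, by omega, by push_cast; omega, by omega,
           fun _ => ⟨by omega, hc⟩,
           fun j hj hj' hj'' => h6 j (by omega) (by omega) (by omega)⟩
        simpa [show (p < (right:Int)) = True by simp; omega] using this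
    · -- non-zero char: both states unchanged except res
      have hA : pvStepA cs (P + 1, (if P < p then (1:Int) else 0), res) ((right : Int), c)
          = (P + 1, (if P < p then (1:Int) else 0), max res ((right : Int) - P)) := by
        have hcur : (if c == '0' then (if P < p then (1:Int) else 0) + 1 else (if P < p then (1:Int) else 0)) = (if P < p then (1:Int) else 0) := by
          simp [hc0]
        have hw : pvWhileA cs cs.length (P + 1) (if P < p then (1:Int) else 0) = (P + 1, if P < p then (1:Int) else 0) :=
          pvWhileA_stop cs cs.length (P + 1) _ (by split <;> omega)
        simp [pvStepA, hc0, hw]; ring_nf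
      have hB : pvStepB (p, P, res) ((right : Int), c) = (p, P, max res ((right : Int) - P)) := by
        simp [pvStepB, hc0]
      rw [hA, hB]
      exact ih (right + 1) p P (max res ((right : Int) - P)) hdrop'
        ⟨h1, h2, by push_cast; omega, h4, h5,
         fun j hj hj' hj'' => by
           by_cases hjr : j = right
           · subst hjr; rw [hc]; exact hc0
           · exact h6 j hj (by omega) hj''⟩

-- ===== VERDICT (by name: the statement is the Claim_ definition above) =====
theorem longest_len_one_after_flip_spec : Claim_equal_longest_len_one_after_flip := by
  intro s _
  unfold Spec_longest_len_one_after_flip longest_len_one_after_flip longest_len_one_after_flip_alt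
  have := pvMain s.toList s.toList 0 (-1) (-1) 0 (by simp)
    ⟨by omega, by omega, by omega, fun _ => rfl, by omega,
     fun j hj hj' _ => by omega⟩
  simpa using this
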